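-- pv_equiv track=rewrite | github.com/filippo46/python-path | lessons/lesson-06.py | countw
-- ===== SOURCE A (Python) =====
-- def countw(t, w):
--     # creo la lista non_alfa per trovare e sostituire eventuali caratteri per poi semplificare la divisione
--     non_alfa = []
--     for c in t:
--         if c not in non_alfa and not c.isalpha():
--             non_alfa.append(c)
--     # sostituisco i non alfa
--     for c in non_alfa:
--         t = t.replace(c, ' ')
--     # porto tutto in minuscolo e divido il testo
--     t = t.lower().split()
--     w = w.lower()
--     # conto le occorrenze
--     count = t.count(w)
--     return count
-- ===== SOURCE B (Python) =====
-- def countw(t, w):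
--     wl = w.lower()
--     buf = ""
--     count = 0
--     for c in t:
--         if c.isalpha():
--             buf += c.lower()
--         else:
--             if buf and buf == wl:
--                 count += 1
--             buf = ""
--     if buf and buf == wl:
--         count += 1
--     return count
-- ===== Notes on version B (the rewrite author's own statement) =====
-- stated objective: alternative
-- what changed: Replaced the build-distinct-non-alpha-list + repeated str.replace passes + lower/split/count pipeline by a single character scan that maintains a lowercased word buffer and a counter, flushing at non-alpha boundaries.
import Mathlib
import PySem

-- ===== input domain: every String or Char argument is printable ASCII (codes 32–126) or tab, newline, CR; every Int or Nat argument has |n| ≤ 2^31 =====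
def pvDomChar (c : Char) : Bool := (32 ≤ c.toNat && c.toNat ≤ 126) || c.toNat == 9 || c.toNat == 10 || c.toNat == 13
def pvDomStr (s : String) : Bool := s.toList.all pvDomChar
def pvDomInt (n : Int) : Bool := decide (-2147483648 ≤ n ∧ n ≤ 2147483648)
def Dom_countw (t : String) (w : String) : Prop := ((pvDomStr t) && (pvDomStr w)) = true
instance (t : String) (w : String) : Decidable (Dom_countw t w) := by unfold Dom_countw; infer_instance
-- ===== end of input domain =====

-- B replaces A's pipeline (distinct-non-alpha list, repeated replace passes, lower+split+count)
-- by a single character scan with a lowercased word buffer and a counter; return values proved equal.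

-- ===== PORT A =====
-- literal port of A: build non_alfa, replace each of its chars by ' ', lower+split, count
-- (c.isalpha() on a 1-char string is PySem.Chars.strIsalpha [c])
def countw (t : String) (w : String) : Int :=
  let nonAlfa : List Char := t.toList.foldl
    (fun acc c => if !(acc.contains c) && !(PySem.Chars.strIsalpha [c]) then acc ++ [c] else acc) []
  let t1 : String := nonAlfa.foldl (fun s c => PySem.Str.replace s (String.ofList [c]) " ") t
  let tw : List String := PySem.Str.split₀ (PySem.Str.lower t1)
  let wl : String := PySem.Str.lower w
  ((PySem.List.count tw wl : Nat) : Int)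

-- ===== PORT B =====
-- Source B's flush: 'if buf and buf == wl: count += 1'
def pvFlush (wl : List Char) (st : List Char × Int) : Int :=
  if st.1 ≠ [] ∧ st.1 = wl then st.2 + 1 else st.2

-- one loop iteration of Source B (c.isalpha() / c.lower() on a 1-char string)
def countwStep (wl : List Char) (st : List Char × Int) (c : Char) : List Char × Int :=
  if PySem.Chars.strIsalpha [c] then (st.1 ++ PySem.Chars.lower [c], st.2)
  else ([], pvFlush wl st)

def countw_alt (t : String) (w : String) : Int :=
  let wl := PySem.Chars.lower w.toList
  pvFlush wl (t.toList.foldl (countwStep wl) ([], 0))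

-- ===== PRECONDITION & SPEC =====
def Spec_countw (t : String) (w : String) (out : Int) : Prop := out = countw_alt t w
instance (t : String) (w : String) (out : Int) : Decidable (Spec_countw t w out) := by unfold Spec_countw; infer_instance

-- ===== CLAIM (what is proved, stated in full; the proofs are below) =====
def Claim_equal_countw : Prop := ∀ (t : String) (w : String), Dom_countw t w → Spec_countw t w (countw t w)

-- ===== LEMMAS AND PROOFS =====

-- the character map A's replace pipeline + lower() effectively applies
def pvG (c : Char) : Char :=
  if PySem.Chars.isalpha c then PySem.Chars.lowerChar c else ' '

theorem pv_lowerChar_toNat {c : Char} (h : PySem.Chars.isalpha c = true) :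
    97 ≤ (PySem.Chars.lowerChar c).toNat ∧ (PySem.Chars.lowerChar c).toNat ≤ 122 := by
  unfold PySem.Chars.isalpha PySem.Chars.isupper PySem.Chars.islower at h
  simp only [Bool.or_eq_true, Bool.and_eq_true, decide_eq_true_eq] at h
  unfold PySem.Chars.lowerChar PySem.Chars.isupper
  rcases h with ⟨h1, h2⟩ | ⟨h1, h2⟩
  · rw [if_pos (by simp [h1, h2])]
    rw [Char.le_def, UInt32.le_iff_toNat_le] at h1 h2
    have h1' : 65 ≤ c.toNat := h1
    have h2' : c.toNat ≤ 90 := h2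
    rw [Char.toNat_ofNat, if_pos (by simp [Nat.isValidChar]; omega)]
    omega
  · rw [Char.le_def, UInt32.le_iff_toNat_le] at h1 h2
    have h1' : 97 ≤ c.toNat := h1
    have h2' : c.toNat ≤ 122 := h2
    have hup : ¬ (c ≤ 'Z') := by
      rw [Char.le_def, UInt32.le_iff_toNat_le]
      change ¬ c.toNat ≤ 90
      omega
    rw [if_neg (by simp [hup])]
    exact ⟨h1', h2'⟩

theorem pv_isspace_of_bounds {c : Char} (h1 : 97 ≤ c.toNat) (h2 : c.toNat ≤ 122) :
    PySem.Chars.isspace c = false := by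
  unfold PySem.Chars.isspace
  simp only [Bool.or_eq_false_iff, Bool.and_eq_false_iff, decide_eq_false_iff_not]
  omega

theorem pv_isspace_pvG (c : Char) :
    PySem.Chars.isspace (pvG c) = (!PySem.Chars.isalpha c) := by
  unfold pvG
  by_cases h : PySem.Chars.isalpha c = true
  · rw [if_pos h, h]
    obtain ⟨h1, h2⟩ := pv_lowerChar_toNat h
    simp [pv_isspace_of_bounds h1 h2]
  · rw [if_neg h]
    simp only [Bool.not_eq_true] at h
    rw [h]
    decide

-- replacing a single character by ' ' is a pointwise map
theorem pv_replace_go_single (c : Char) :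
    ∀ (l : List Char) (fuel : Nat) (acc : List Char), l.length ≤ fuel →
      PySem.Chars.replace.go [c] [' '] fuel l acc
        = acc.reverse ++ l.map (fun ch => if ch = c then ' ' else ch) := by
  intro l
  induction l with
  | nil => intro fuel acc _; cases fuel <;> simp [PySem.Chars.replace.go]
  | cons d l ih =>
    intro fuel acc hf
    cases fuel with
    | zero => simp at hf
    | succ n =>
      by_cases hdc : c = d
      · subst hdc
        simp only [PySem.Chars.replace.go, List.isPrefixOf, BEq.rfl, Bool.true_and, if_pos,
          List.length_cons, List.drop_succ_cons, List.reverse_cons, List.reverse_nil]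
        simp only [List.length_nil, List.drop_zero, List.nil_append]
        rw [show [' '] ++ acc = ' ' :: acc from rfl, ih n (' ' :: acc) (by simpa using hf)]
        simp
      · have hpre : [c].isPrefixOf (d :: l) = false := by
          simp [List.isPrefixOf, hdc]
        simp only [PySem.Chars.replace.go, hpre, Bool.false_eq_true, if_false]
        rw [ih n (d :: acc) (by simpa using hf)]
        simp [Ne.symm hdc]

theorem pv_replace_single (s : List Char) (c : Char) :
    PySem.Chars.replace s [c] [' '] = s.map (fun ch => if ch = c then ' ' else ch) := by
  unfold PySem.Chars.replace
  simp only [List.isEmpty_cons, Bool.false_eq_true, if_false]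
  rw [pv_replace_go_single c s s.length [] le_rfl]
  simp

-- A's replace loop over any list of characters, as one pointwise map
theorem pv_foldl_replace_toList :
    ∀ (L : List Char) (s : String),
      (L.foldl (fun s c => PySem.Str.replace s (String.ofList [c]) " ") s).toList
        = s.toList.map (fun ch => if ch ∈ L then ' ' else ch) := by
  intro L
  induction L with
  | nil => intro s; simp
  | cons c L ih =>
    intro s
    rw [List.foldl_cons, ih]
    rw [PySem.Str.toList_replace]
    simp only [String.toList_ofList]
    have hsp : (" " : String).toList = [' '] := rfl
    rw [hsp, pv_replace_single, List.map_map]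
    refine List.map_congr_left ?_
    intro ch _
    by_cases hc : ch = c
    · subst hc
      simp only [Function.comp, List.mem_cons, true_or, if_true]
      split <;> rfl
    · simp [Function.comp, hc]

-- membership in A's non_alfa accumulator
theorem pv_mem_nonalfa (x : Char) :
    ∀ (l acc : List Char),
      (x ∈ l.foldl (fun acc c =>
          if !(acc.contains c) && !(PySem.Chars.strIsalpha [c]) then acc ++ [c] else acc) acc)
        ↔ (x ∈ acc ∨ (x ∈ l ∧ PySem.Chars.isalpha x = false)) := by
  intro l
  induction l with
  | nil => intro acc; simp
  | cons c l ih =>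
    intro acc
    rw [List.foldl_cons]
    by_cases hmem : c ∈ acc
    · rw [if_neg (by simp [hmem])]
      rw [ih]
      constructor
      · rintro (h | h)
        · exact Or.inl h
        · exact Or.inr ⟨List.mem_cons_of_mem _ h.1, h.2⟩
      · rintro (h | ⟨hx, ha⟩)
        · exact Or.inl h
        · rcases List.mem_cons.mp hx with rfl | hx
          · exact Or.inl hmem
          · exact Or.inr ⟨hx, ha⟩
    · by_cases halpha : PySem.Chars.isalpha c = true
      · have hs : PySem.Chars.strIsalpha [c] = true := by
          simp [PySem.Chars.strIsalpha, halpha]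
        rw [if_neg (by simp [hs])]
        rw [ih]
        constructor
        · rintro (h | h)
          · exact Or.inl h
          · exact Or.inr ⟨List.mem_cons_of_mem _ h.1, h.2⟩
        · rintro (h | ⟨hx, ha⟩)
          · exact Or.inl h
          · rcases List.mem_cons.mp hx with rfl | hx
            · rw [halpha] at ha; cases ha
            · exact Or.inr ⟨hx, ha⟩
      · have hs : PySem.Chars.strIsalpha [c] = false := by
          simp only [PySem.Chars.strIsalpha, List.isEmpty_cons, Bool.not_false, List.all_cons,
            List.all_nil, Bool.and_true, Bool.true_and]
          simpa using halpha
        rw [if_pos (by simp [hs]; exact hmem)]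
        rw [ih]
        simp only [List.mem_append, List.mem_cons]
        constructor
        · rintro ((h | rfl | h) | h)
          · exact Or.inl h
          · exact Or.inr ⟨Or.inl rfl, by simpa using halpha⟩
          · cases h
          · exact Or.inr ⟨Or.inr h.1, h.2⟩
        · rintro (h | ⟨rfl | hx, ha⟩)
          · exact Or.inl (Or.inl h)
          · exact Or.inl (Or.inr (Or.inl rfl))
          · exact Or.inr ⟨hx, ha⟩

-- the central lockstep lemma: split₀.go on the pvG-mapped text runs in step with B's buffered scan
theorem pv_go_count (wl : List Char) :
    ∀ (l buf : List Char) (acc : List (List Char)) (cnt : Int),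
      ((List.count wl (PySem.Chars.split₀.go (l.map pvG) buf.reverse acc) : Nat) : Int) + cnt
        = ((List.count wl acc : Nat) : Int)
          + pvFlush wl (l.foldl (countwStep wl) (buf, cnt)) := by
  intro l
  induction l with
  | nil =>
    intro buf acc cnt
    cases buf with
    | nil =>
      simp [PySem.Chars.split₀.go, pvFlush]
    | cons b bs =>
      have hne : ((b :: bs).reverse).isEmpty = false := by simp
      simp only [List.map_nil, PySem.Chars.split₀.go, hne, Bool.false_eq_true, if_false,
        List.count_reverse, List.reverse_reverse, List.foldl_nil]
      rw [List.count_cons]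
      by_cases hw : b :: bs = wl
      · have hfl : pvFlush wl (b :: bs, cnt) = cnt + 1 := by
          unfold pvFlush
          exact if_pos ⟨List.cons_ne_nil b bs, hw⟩
        have hbe : ((b :: bs) == wl) = true := by simpa using hw
        rw [hfl, hbe]
        simp
        push_cast
        ring
      · have hfl : pvFlush wl (b :: bs, cnt) = cnt := by
          unfold pvFlush
          exact if_neg (by simp [hw])
        have hbe : ((b :: bs) == wl) = false := by simpa using hw
        rw [hfl, hbe]
        simp
  | cons c l ih =>
    intro buf acc cnt
    by_cases halpha : PySem.Chars.isalpha c = true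
    · have hsa : PySem.Chars.strIsalpha [c] = true := by simp [PySem.Chars.strIsalpha, halpha]
      have hstep : countwStep wl (buf, cnt) c = (buf ++ PySem.Chars.lower [c], cnt) := by
        unfold countwStep
        rw [if_pos hsa]
      have hsp : PySem.Chars.isspace (pvG c) = false := by
        rw [pv_isspace_pvG, halpha]; rfl
      rw [List.map_cons]
      simp only [PySem.Chars.split₀.go, hsp, Bool.false_eq_true, if_false]
      rw [List.foldl_cons, hstep]
      have hrev : pvG c :: buf.reverse = (buf ++ PySem.Chars.lower [c]).reverse := by
        simp [pvG, halpha, PySem.Chars.lower]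
      rw [hrev, ih]
    · have hfa : PySem.Chars.isalpha c = false := by simpa using halpha
      have hsa : PySem.Chars.strIsalpha [c] = false := by
        simp [PySem.Chars.strIsalpha, hfa]
      have hstep : countwStep wl (buf, cnt) c = ([], pvFlush wl (buf, cnt)) := by
        unfold countwStep
        rw [if_neg (by simp [hsa])]
      have hsp : PySem.Chars.isspace (pvG c) = true := by
        rw [pv_isspace_pvG, hfa]; rfl
      rw [List.map_cons, List.foldl_cons, hstep]
      simp only [PySem.Chars.split₀.go, hsp, if_true]
      cases buf with
      | nil =>
        have hfl : pvFlush wl ([], cnt) = cnt := by simp [pvFlush]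
        rw [hfl]
        simp only [List.reverse_nil, List.isEmpty_nil, if_true]
        have h := ih [] acc cnt
        simpa using h
      | cons b bs =>
        have hne : ((b :: bs).reverse).isEmpty = false := by simp
        simp only [hne, Bool.false_eq_true, if_false, List.reverse_reverse]
        have h := ih [] ((b :: bs) :: acc) (pvFlush wl (b :: bs, cnt))
        simp only [List.reverse_nil] at h
        by_cases hw : b :: bs = wl
        · have hX : pvFlush wl (b :: bs, cnt) = cnt + 1 := by
            unfold pvFlush
            exact if_pos ⟨List.cons_ne_nil b bs, hw⟩
          have hC : List.count wl ((b :: bs) :: acc) = List.count wl acc + 1 := by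
            rw [List.count_cons]; simp [hw]
          rw [hX] at h ⊢
          rw [hC] at h
          push_cast at h ⊢
          omega
        · have hX : pvFlush wl (b :: bs, cnt) = cnt := by
            unfold pvFlush
            exact if_neg (by simp [hw])
          have hC : List.count wl ((b :: bs) :: acc) = List.count wl acc := by
            rw [List.count_cons]; simp [hw]
          rw [hX] at h ⊢
          rw [hC] at h
          omega

theorem pv_ofList_injective : Function.Injective String.ofList := by
  intro a b h
  have := congrArg String.toList h
  simpa using this

-- ===== VERDICT (by name: the statement is the Claim_ definition above) =====
theorem countw_spec : Claim_equal_countw := by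
  intro t w _
  unfold Spec_countw countw countw_alt
  show ((PySem.List.count
      (PySem.Str.split₀ (PySem.Str.lower
        ((t.toList.foldl (fun acc c =>
            if !(acc.contains c) && !(PySem.Chars.strIsalpha [c]) then acc ++ [c] else acc) []).foldl
          (fun s c => PySem.Str.replace s (String.ofList [c]) " ") t)))
      (PySem.Str.lower w) : Nat) : Int)
    = pvFlush (PySem.Chars.lower w.toList)
        (t.toList.foldl (countwStep (PySem.Chars.lower w.toList)) ([], 0))
  set nonAlfa : List Char := t.toList.foldl
    (fun acc c => if !(acc.contains c) && !(PySem.Chars.strIsalpha [c]) then acc ++ [c] else acc) []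
    with hNA
  have h2 : (PySem.Str.lower
      (nonAlfa.foldl (fun s c => PySem.Str.replace s (String.ofList [c]) " ") t)).toList
      = t.toList.map pvG := by
    rw [PySem.Str.toList_lower, pv_foldl_replace_toList nonAlfa t]
    unfold PySem.Chars.lower
    rw [List.map_map]
    refine List.map_congr_left ?_
    intro ch hch
    have hmem : ch ∈ nonAlfa ↔
        (ch ∈ ([] : List Char) ∨ (ch ∈ t.toList ∧ PySem.Chars.isalpha ch = false)) := by
      rw [hNA]; exact pv_mem_nonalfa ch t.toList []
    by_cases halpha : PySem.Chars.isalpha ch = true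
    · have hni : ch ∉ nonAlfa := by
        rw [hmem]; simp [halpha]
      simp [Function.comp, hni, pvG, halpha]
    · have hin : ch ∈ nonAlfa := by
        rw [hmem]; simp [hch]; simpa using halpha
      have hlsp : PySem.Chars.lowerChar ' ' = ' ' := by decide
      simp [Function.comp, hin, pvG, halpha, hlsp]
  unfold PySem.Str.split₀
  have hwl : PySem.Str.lower w = String.ofList (PySem.Chars.lower w.toList) := by
    rw [← PySem.Str.toList_lower, String.ofList_toList]
  rw [hwl]
  unfold PySem.List.count
  rw [List.count_map_of_injective _ String.ofList pv_ofList_injective (PySem.Chars.lower w.toList)]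
  unfold PySem.Chars.split₀
  rw [h2]
  have h := pv_go_count (PySem.Chars.lower w.toList) t.toList [] [] 0
  simp only [List.reverse_nil, List.count_nil, Nat.cast_zero, add_zero, zero_add] at h
  exact h
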